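-- pv_equiv track=rewrite | github.com/prsnt558908/CodeZymSolutions | q58-s3-backup-storage-cost/solution-2-python/Solution.py | getMinimumStorageCost
-- ===== SOURCE A (Python) =====
-- from typing import List, Dict, Tuple
--
-- def getMinimumStorageCost(n: int, encCost: int, flatCost: int, sensitiveFiles: List[int]) -> int:
--     """
--     Returns the minimum total storage cost following the rules:
--     - Cost of a batch of size M with X sensitive files:
--         * flatCost if X == 0
--         * M * X * encCost if X > 0
--     - If M is even, you may either store whole or split into two equal contiguous halves.
--     """
--     if n <= 0:
--         return 0
--
--     # Mark sensitive files (ignore out-of-range values defensively)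
--     is_sens = [0] * (n + 1)  # 1-indexed
--     for f in sensitiveFiles:
--         if 1 <= f <= n:
--             is_sens[f] = 1
--
--     # Prefix sums to query #sensitive in any interval [l..r] in O(1)
--     pref = [0] * (n + 1)
--     for i in range(1, n + 1):
--         pref[i] = pref[i - 1] + is_sens[i]
--
--     def sensitive_count(l: int, r: int) -> int:
--         return pref[r] - pref[l - 1]
--
--     memo: Dict[Tuple[int, int], int] = {}
--
--     def dfs(l: int, length: int) -> int:
--         key = (l, length)
--         if key in memo:
--             return memo[key]
--
--         r = l + length - 1
--         x = sensitive_count(l, r)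
--
--         # Cost if we store this batch as-is
--         if x == 0:
--             whole = flatCost
--         else:
--             whole = length * x * encCost
--
--         # If length is odd, we cannot split
--         if length % 2 == 1:
--             memo[key] = whole
--             return whole
--
--         half = length // 2
--         split_cost = dfs(l, half) + dfs(l + half, half)
--         ans = whole if whole < split_cost else split_cost
--         memo[key] = ans
--         return ans
--
--     return dfs(1, n)
-- ===== SOURCE B (Python) =====
-- from typing import List
--
-- def getMinimumStorageCost(n: int, encCost: int, flatCost: int, sensitiveFiles: List[int]) -> int:
--     if n <= 0:
--         return 0
--     sens = {f for f in sensitiveFiles if 1 <= f <= n}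
--
--     def dfs(l: int, length: int):
--         # returns (minCost, sensitiveCount) for the batch [l, l+length-1]
--         if length % 2 == 1:
--             x = sum(1 for i in range(l, l + length) if i in sens)
--             return (flatCost if x == 0 else length * x * encCost, x)
--         half = length // 2
--         cl, xl = dfs(l, half)
--         cr, xr = dfs(l + half, half)
--         x = xl + xr
--         whole = flatCost if x == 0 else length * x * encCost
--         return (min(whole, cl + cr), x)
--
--     return dfs(1, n)[0]
-- ===== Notes on version B (the rewrite author's own statement) =====
-- stated objective: simpler
-- what changed: Replaces the is_sens array, prefix-sum table and memo dict with a single set of in-range sensitive indices and a recursion that returns (cost, sensitiveCount), computing each batch's count compositionally from its halves instead of by table lookup.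
import Mathlib
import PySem

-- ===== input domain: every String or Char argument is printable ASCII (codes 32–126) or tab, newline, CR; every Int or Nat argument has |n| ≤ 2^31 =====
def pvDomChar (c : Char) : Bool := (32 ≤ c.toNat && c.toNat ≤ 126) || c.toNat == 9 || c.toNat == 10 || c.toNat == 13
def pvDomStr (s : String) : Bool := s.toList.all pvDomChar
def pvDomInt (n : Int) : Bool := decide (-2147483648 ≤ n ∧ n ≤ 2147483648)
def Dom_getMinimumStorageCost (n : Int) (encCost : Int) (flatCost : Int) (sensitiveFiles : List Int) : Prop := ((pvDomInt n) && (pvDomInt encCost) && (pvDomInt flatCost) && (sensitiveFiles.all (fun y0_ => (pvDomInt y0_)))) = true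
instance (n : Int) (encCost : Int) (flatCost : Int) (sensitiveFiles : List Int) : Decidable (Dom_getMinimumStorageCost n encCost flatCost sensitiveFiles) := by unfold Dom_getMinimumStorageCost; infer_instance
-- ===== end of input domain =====

-- B replaces A's is_sens array, prefix-sum table and memo dict by a set of in-range sensitive
-- indices and a recursion returning (cost, sensitiveCount); objective: simpler.

-- ===== PORT A =====
-- A's dfs, with the memo dict threaded through; the fuel argument is only a totality
-- guard (never exhausted on the calls the port makes).
def pvDfsA (pref : List Int) (encCost flatCost : Int) :
    Nat → Int → Int → PySem.Dict (Int × Int) Int → PySem.Dict (Int × Int) Int × Int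
  | 0, _, _, memo => (memo, 0)
  | fuel+1, l, length, memo =>
    match PySem.Dict.get? memo (l, length) with
    | some v => (memo, v)
    | none =>
      let r := l + length - 1
      let x := PySem.List.pyGetD pref r 0 - PySem.List.pyGetD pref (l - 1) 0
      let whole := if x == 0 then flatCost else length * x * encCost
      if PySem.Int.mod length 2 == 1 then
        (PySem.Dict.insert memo (l, length) whole, whole)
      else
        let half := PySem.Int.floordiv length 2
        let p1 := pvDfsA pref encCost flatCost fuel l half memo
        let p2 := pvDfsA pref encCost flatCost fuel (l + half) half p1.1
        let splitCost := p1.2 + p2.2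
        let ans := if whole < splitCost then whole else splitCost
        (PySem.Dict.insert p2.1 (l, length) ans, ans)

def getMinimumStorageCost (n : Int) (encCost : Int) (flatCost : Int) (sensitiveFiles : List Int) : Int :=
  if n ≤ 0 then 0
  else
    let isSens := sensitiveFiles.foldl
      (fun a f => if 1 ≤ f ∧ f ≤ n then PySem.List.pySetD a f 1 else a)
      (List.replicate (n + 1).toNat 0)
    let pref := (PySem.List.pyRange 1 (n + 1) 1).foldl
      (fun a i => PySem.List.pySetD a i (PySem.List.pyGetD a (i - 1) 0 + PySem.List.pyGetD isSens i 0))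
      (List.replicate (n + 1).toNat 0)
    (pvDfsA pref encCost flatCost (n.toNat + 1) 1 n PySem.Dict.empty).2

-- ===== PORT B =====
-- B's dfs: returns (minCost, sensitiveCount); fuel is only a totality guard.
def pvDfsB (sens : PySem.Set Int) (encCost flatCost : Int) :
    Nat → Int → Int → Int × Int
  | 0, _, _ => (0, 0)
  | fuel+1, l, length =>
    if PySem.Int.mod length 2 == 1 then
      let x := (PySem.List.pyRange l (l + length) 1).foldl
        (fun acc i => if PySem.Set.contains sens i then acc + 1 else acc) 0
      ((if x == 0 then flatCost else length * x * encCost), x)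
    else
      let half := PySem.Int.floordiv length 2
      let pl := pvDfsB sens encCost flatCost fuel l half
      let pr := pvDfsB sens encCost flatCost fuel (l + half) half
      let x := pl.2 + pr.2
      let whole := if x == 0 then flatCost else length * x * encCost
      (min whole (pl.1 + pr.1), x)

def getMinimumStorageCost_alt (n : Int) (encCost : Int) (flatCost : Int) (sensitiveFiles : List Int) : Int :=
  if n ≤ 0 then 0
  else
    let sens := PySem.Set.ofList (sensitiveFiles.filter (fun f => decide (1 ≤ f) && decide (f ≤ n)))
    (pvDfsB sens encCost flatCost (n.toNat + 1) 1 n).1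

-- ===== PRECONDITION & SPEC =====
def Spec_getMinimumStorageCost (n : Int) (encCost : Int) (flatCost : Int) (sensitiveFiles : List Int) (out : Int) : Prop := out = getMinimumStorageCost_alt n encCost flatCost sensitiveFiles
instance (n : Int) (encCost : Int) (flatCost : Int) (sensitiveFiles : List Int) (out : Int) : Decidable (Spec_getMinimumStorageCost n encCost flatCost sensitiveFiles out) := by unfold Spec_getMinimumStorageCost; infer_instance

-- ===== CLAIM (what is proved, stated in full; the proofs are below) =====
def Claim_equal_getMinimumStorageCost : Prop := ∀ (n : Int) (encCost : Int) (flatCost : Int) (sensitiveFiles : List Int), Dom_getMinimumStorageCost n encCost flatCost sensitiveFiles → Spec_getMinimumStorageCost n encCost flatCost sensitiveFiles (getMinimumStorageCost n encCost flatCost sensitiveFiles)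

-- ===== LEMMAS AND PROOFS =====

-- The in-range-sensitive predicate that both programs effectively count.
def pvPred (fs : List Int) (n : Int) (i : Int) : Bool :=
  decide (i ∈ fs) && decide (1 ≤ i) && decide (i ≤ n)

-- Number of in-range sensitive indices in [l, m).
def pvCnt (fs : List Int) (n l m : Int) : Int :=
  ((PySem.List.pyRange l m 1).countP (pvPred fs n) : Int)

-- Fuel-free reference recursion (cost, count); proof-side helper only.
def pvSpec (fs : List Int) (n encCost flatCost : Int) (l : Int) : Nat → Int × Int
  | len =>
    if len % 2 = 1 then
      let x := pvCnt fs n l (l + len)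
      ((if x == 0 then flatCost else (len : Int) * x * encCost), x)
    else if _h0 : len = 0 then (flatCost, 0)
    else
      let pl := pvSpec fs n encCost flatCost l (len / 2)
      let pr := pvSpec fs n encCost flatCost (l + (len / 2 : Nat)) (len / 2)
      let x := pl.2 + pr.2
      let whole := if x == 0 then flatCost else (len : Int) * x * encCost
      (min whole (pl.1 + pr.1), x)
  termination_by len => len
  decreasing_by all_goals omega

theorem pvCnt_split (fs : List Int) (n l m r : Int) (h1 : l ≤ m) (h2 : m ≤ r) :
    pvCnt fs n l m + pvCnt fs n m r = pvCnt fs n l r := by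
  unfold pvCnt
  rw [PySem.List.pyRange_one_append l m r h1 h2, List.countP_append]
  push_cast; ring

theorem pvSpec_snd (fs : List Int) (n encCost flatCost : Int) :
    ∀ (len : Nat) (l : Int), 0 < len →
    (pvSpec fs n encCost flatCost l len).2 = pvCnt fs n l (l + len) := by
  intro len
  induction len using Nat.strong_induction_on with
  | _ len ih =>
    intro l hpos
    rw [pvSpec]
    by_cases hodd : len % 2 = 1
    · simp [hodd]
    · have hz : len ≠ 0 := by omega
      have hhalf : 0 < len / 2 := by omega
      have hlt : len / 2 < len := by omega
      simp only [hodd, hz, if_false]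
      rw [ih _ hlt _ hhalf, ih _ hlt _ hhalf]
      have hc : (l + (len / 2 : Nat)) + ((len / 2 : Nat) : Int) = l + (len : Int) := by
        push_cast; omega
      rw [hc]
      exact pvCnt_split fs n l (l + ((len/2 : Nat) : Int)) (l + (len : Int)) (by push_cast; omega)
        (by push_cast; omega)

theorem pvSensContains (fs : List Int) (n : Int) :
    (fun i => PySem.Set.contains (PySem.Set.ofList (fs.filter (fun f => decide (1 ≤ f) && decide (f ≤ n)))) i)
      = pvPred fs n := by
  funext i
  simp [PySem.Set.contains, PySem.Set.mem_ofList, Bool.and_assoc, pvPred]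

theorem pvDfsB_eq_spec (fs : List Int) (n encCost flatCost : Int) :
    ∀ (fuel : Nat) (l : Int) (len : Nat), 0 < len → len < 2 ^ fuel →
    pvDfsB (PySem.Set.ofList (fs.filter (fun f => decide (1 ≤ f) && decide (f ≤ n))))
        encCost flatCost fuel l (len : Int) = pvSpec fs n encCost flatCost l len := by
  intro fuel
  induction fuel with
  | zero => intro l len h1 h2; omega
  | succ fuel ih =>
    intro l len hpos hlt
    rw [pvSpec]
    show (if PySem.Int.mod (len : Int) 2 == 1 then _ else _) = _
    rw [show PySem.Int.mod (len : Int) 2 = ((len % 2 : Nat) : Int) from PySem.Int.mod_natCast len 2]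
    by_cases hodd : len % 2 = 1
    · simp only [hodd, Nat.cast_one, beq_self_eq_true, if_true]
      rw [PySem.List.foldl_if_add_one
            (fun i => PySem.Set.contains (PySem.Set.ofList (fs.filter (fun f => decide (1 ≤ f) && decide (f ≤ n)))) i)]
      rw [pvSensContains]
      simp [pvCnt]
    · have h2 : len % 2 = 0 := by omega
      have hz : len ≠ 0 := by omega
      have hhalf : 0 < len / 2 := by omega
      have hlt' : len / 2 < 2 ^ fuel := by
        have := Nat.pow_succ 2 fuel
        omega
      simp only [h2, Nat.cast_zero, hz, dite_false]
      simp only [show ((0 : Int) == 1) = false from rfl, Bool.false_eq_true, if_false]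
      rw [show PySem.Int.floordiv (len : Int) 2 = ((len / 2 : Nat) : Int) from PySem.Int.floordiv_natCast len 2]
      rw [ih l (len / 2) hhalf hlt', ih (l + ((len/2 : Nat) : Int)) (len / 2) hhalf hlt']
      norm_num

theorem pvMark (n : Int) :
    ∀ (fsl : List Int) (arr : List Int) (g : Int → Int),
    arr.length = (n+1).toNat →
    (∀ j : Int, 0 ≤ j → j ≤ n → PySem.List.pyGetD arr j 0 = g j) →
    (fsl.foldl (fun a f => if 1 ≤ f ∧ f ≤ n then PySem.List.pySetD a f 1 else a) arr).length = (n+1).toNat ∧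
    (∀ j : Int, 0 ≤ j → j ≤ n →
      PySem.List.pyGetD (fsl.foldl (fun a f => if 1 ≤ f ∧ f ≤ n then PySem.List.pySetD a f 1 else a) arr) j 0
        = if j ∈ fsl ∧ 1 ≤ j then 1 else g j) := by
  intro fsl
  induction fsl with
  | nil =>
    intro arr g hlen hg
    exact ⟨hlen, fun j h0 hn => by simpa using hg j h0 hn⟩
  | cons f fsl ih =>
    intro arr g hlen hg
    simp only [List.foldl_cons]
    by_cases hf : 1 ≤ f ∧ f ≤ n
    · rw [if_pos hf]
      have hfe : (f : Int) = ((f.toNat : Nat) : Int) := (Int.toNat_of_nonneg (by omega)).symm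
      have hlen' : (PySem.List.pySetD arr f 1).length = (n+1).toNat := by
        rw [PySem.List.length_pySetD]; exact hlen
      have hg' : ∀ j : Int, 0 ≤ j → j ≤ n →
          PySem.List.pyGetD (PySem.List.pySetD arr f 1) j 0 = if j = f then 1 else g j := by
        intro j h0 hn
        have hje : (j : Int) = ((j.toNat : Nat) : Int) := (Int.toNat_of_nonneg h0).symm
        rw [hfe, hje, PySem.List.pyGetD_pySetD_natCast arr f.toNat j.toNat 1 0 (by omega)]
        by_cases hj : j = f
        · rw [if_pos (show j.toNat = f.toNat by omega),
              if_pos (show ((j.toNat : Nat) : Int) = ((f.toNat : Nat) : Int) by omega)]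
        · rw [if_neg (show ¬ j.toNat = f.toNat by omega), ← hje,
              if_neg (show ¬ j = ((f.toNat : Nat) : Int) by omega)]
          exact hg j h0 hn
      obtain ⟨h1, h2⟩ := ih (PySem.List.pySetD arr f 1) (fun j => if j = f then 1 else g j) hlen' hg'
      refine ⟨h1, fun j h0 hn => ?_⟩
      rw [h2 j h0 hn]
      by_cases hj : j = f
      · subst hj
        by_cases hm : j ∈ fsl <;> simp [hm, hf.1]
      · by_cases hm : j ∈ fsl <;> simp [hm, hj]
    · rw [if_neg hf]
      obtain ⟨h1, h2⟩ := ih arr g hlen hg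
      refine ⟨h1, fun j h0 hn => ?_⟩
      rw [h2 j h0 hn]
      by_cases hj : j = f
      · subst hj
        have : ¬ (1 : Int) ≤ j := fun h => hf ⟨h, hn⟩
        by_cases hm : j ∈ fsl <;> simp [hm, this]
      · by_cases hm : j ∈ fsl <;> simp [hm, hj]

theorem pvCnt_succ (fs : List Int) (n b : Int) (hb : 1 ≤ b) :
    pvCnt fs n 1 (b + 1) = pvCnt fs n 1 b + (if pvPred fs n b then 1 else 0) := by
  unfold pvCnt
  rw [PySem.List.pyRange_one_succ_right hb, List.countP_append]
  by_cases h : pvPred fs n b <;> simp [h]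

theorem pvPref (fs : List Int) (n : Int) (isSens : List Int)
    (hs : ∀ j : Int, 0 ≤ j → j ≤ n →
      PySem.List.pyGetD isSens j 0 = if pvPred fs n j then 1 else 0) :
    ∀ (m : Nat), (m : Int) ≤ n →
    ((PySem.List.pyRange 1 (1 + (m : Int)) 1).foldl
        (fun a i => PySem.List.pySetD a i (PySem.List.pyGetD a (i - 1) 0 + PySem.List.pyGetD isSens i 0))
        (List.replicate (n + 1).toNat 0)).length = (n + 1).toNat ∧
    (∀ j : Int, 0 ≤ j → j ≤ n →
      PySem.List.pyGetD ((PySem.List.pyRange 1 (1 + (m : Int)) 1).foldl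
        (fun a i => PySem.List.pySetD a i (PySem.List.pyGetD a (i - 1) 0 + PySem.List.pyGetD isSens i 0))
        (List.replicate (n + 1).toNat 0)) j 0 = if j ≤ (m : Int) then pvCnt fs n 1 (j + 1) else 0) := by
  intro m
  induction m with
  | zero =>
    intro hm
    have hr : PySem.List.pyRange 1 (1 + ((0 : Nat) : Int)) 1 = [] := by
      rw [PySem.List.pyRange_one]; simp
    rw [hr]
    simp only [List.foldl_nil]
    refine ⟨by simp, fun j h0 hn => ?_⟩
    have hje : (j : Int) = ((j.toNat : Nat) : Int) := (Int.toNat_of_nonneg h0).symm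
    rw [hje, PySem.List.pyGetD_natCast]
    all_goals rw [List.getD_replicate (0:Int) (y := (0:Int)) (i := j.toNat) (n := (n+1).toNat) (by omega)]
    by_cases hj0 : j ≤ ((0 : Nat) : Int)
    · rw [if_pos (by omega : ((j.toNat : Nat) : Int) ≤ ((0:Nat) : Int))]
      have hj' : j.toNat = 0 := by omega
      rw [hj']
      show (0 : Int) = pvCnt fs n 1 (((0:Nat) : Int) + 1)
      unfold pvCnt; rw [PySem.List.pyRange_one]; simp
    · rw [if_neg (by omega : ¬ ((j.toNat : Nat) : Int) ≤ ((0:Nat) : Int))]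
  | succ m ih =>
    intro hm
    obtain ⟨ihlen, ihget⟩ := ih (by push_cast at hm ⊢; omega)
    have hr : PySem.List.pyRange 1 (1 + ((m+1 : Nat) : Int)) 1
        = PySem.List.pyRange 1 (1 + (m : Int)) 1 ++ [1 + (m : Int)] := by
      have h1 : (1 : Int) ≤ 1 + (m : Int) := by omega
      have : (1 + ((m+1 : Nat) : Int)) = (1 + (m : Int)) + 1 := by push_cast; ring
      rw [this, PySem.List.pyRange_one_succ_right h1]
    rw [hr, List.foldl_append]
    simp only [List.foldl_cons, List.foldl_nil]
    set A := (PySem.List.pyRange 1 (1 + (m : Int)) 1).foldl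
        (fun a i => PySem.List.pySetD a i (PySem.List.pyGetD a (i - 1) 0 + PySem.List.pyGetD isSens i 0))
        (List.replicate (n + 1).toNat 0) with hA
    have hv : PySem.List.pyGetD A (1 + (m : Int) - 1) 0 + PySem.List.pyGetD isSens (1 + (m : Int)) 0
        = pvCnt fs n 1 ((m : Int) + 1 + 1) := by
      have e1 : (1 + (m : Int) - 1) = (m : Int) := by ring
      rw [e1, ihget (m : Int) (by omega) (by push_cast at hm; omega),
          if_pos (le_refl ((m : Int)))]
      rw [hs (1 + (m : Int)) (by omega) (by push_cast at hm; omega)]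
      rw [pvCnt_succ fs n ((m : Int) + 1) (by omega)]
      have e2 : (1 + (m : Int)) = ((m : Int) + 1) := by ring
      rw [e2]
    constructor
    · rw [PySem.List.length_pySetD]; exact ihlen
    · intro j h0 hn
      have hje : (j : Int) = ((j.toNat : Nat) : Int) := (Int.toNat_of_nonneg h0).symm
      have hke : (1 + (m : Int)) = ((m + 1 : Nat) : Int) := by push_cast; ring
      rw [hv, hke, hje,
          PySem.List.pyGetD_pySetD_natCast A (m+1) j.toNat _ 0 (by rw [ihlen]; push_cast at hm; omega)]
      by_cases hj : j.toNat = m + 1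
      · rw [if_pos hj, if_pos (by omega : ((j.toNat : Nat) : Int) ≤ ((m+1 : Nat) : Int))]
        have : ((j.toNat : Nat) : Int) + 1 = (m : Int) + 1 + 1 := by omega
        rw [this]
      · rw [if_neg hj, ← hje, ihget j h0 hn]
        by_cases hjm : j ≤ (m : Int)
        · rw [if_pos hjm, if_pos (by push_cast; omega : j ≤ ((m+1 : Nat) : Int))]
        · rw [if_neg hjm, if_neg (by push_cast at hjm ⊢; omega : ¬ j ≤ ((m+1 : Nat) : Int))]

-- The memo invariant: every stored value is the reference cost of its key.
def pvInv (fs : List Int) (n encCost flatCost : Int) (memo : PySem.Dict (Int × Int) Int) : Prop :=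
  ∀ (l' len' v : Int), memo.get? (l', len') = some v →
    0 ≤ len' ∧ v = (pvSpec fs n encCost flatCost l' len'.toNat).1

theorem pvDfsA_main (fs : List Int) (n encCost flatCost : Int) (pref : List Int)
    (hx : ∀ (l : Int) (len : Nat), 1 ≤ l → 0 < len → l + (len : Int) - 1 ≤ n →
      PySem.List.pyGetD pref (l + (len : Int) - 1) 0 - PySem.List.pyGetD pref (l - 1) 0
        = pvCnt fs n l (l + (len : Int))) :
    ∀ (fuel : Nat) (l : Int) (len : Nat) (memo : PySem.Dict (Int × Int) Int),
    pvInv fs n encCost flatCost memo → 1 ≤ l → 0 < len → l + (len : Int) - 1 ≤ n → len < 2 ^ fuel →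
    (pvDfsA pref encCost flatCost fuel l (len : Int) memo).2 = (pvSpec fs n encCost flatCost l len).1 ∧
    pvInv fs n encCost flatCost (pvDfsA pref encCost flatCost fuel l (len : Int) memo).1 := by
  intro fuel
  induction fuel with
  | zero => intro l len memo hinv hl hpos hr hlt; omega
  | succ fuel ih =>
    intro l len memo hinv hl hpos hr hlt
    rw [pvDfsA]
    cases hmem : PySem.Dict.get? memo (l, (len : Int)) with
    | some v =>
      obtain ⟨-, hv⟩ := hinv l (len : Int) v hmem
      simpa [hv] using hinv
    | none =>
      simp only
      rw [hx l len hl hpos hr,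
          show PySem.Int.mod (len : Int) 2 = ((len % 2 : Nat) : Int) from PySem.Int.mod_natCast len 2]
      by_cases hodd : len % 2 = 1
      · simp only [hodd, Nat.cast_one, beq_self_eq_true, if_true]
        have hspec : (pvSpec fs n encCost flatCost l len).1
            = (if pvCnt fs n l (l + (len : Int)) == 0 then flatCost
               else (len : Int) * pvCnt fs n l (l + (len : Int)) * encCost) := by
          rw [pvSpec]; simp [hodd]
        refine ⟨hspec.symm, ?_⟩
        intro l' len' v hget
        by_cases hk : (l', len') = (l, (len : Int))
        · rw [hk, PySem.Dict.get?_insert_self] at hget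
          cases hget
          have : ((len : Int)).toNat = len := by omega
          rcases Prod.mk.injEq .. ▸ hk with ⟨h1, h2⟩
          subst h1; subst h2
          exact ⟨by omega, by rw [this, hspec]⟩
        · rw [PySem.Dict.get?_insert_of_ne _ _ hk] at hget
          exact hinv l' len' v hget
      · have h2 : len % 2 = 0 := by omega
        have hz : len ≠ 0 := by omega
        have hhalf : 0 < len / 2 := by omega
        have hlt' : len / 2 < 2 ^ fuel := by
          have := Nat.pow_succ 2 fuel
          omega
        simp only [h2, Nat.cast_zero, show ((0 : Int) == 1) = false from rfl,
          Bool.false_eq_true, if_false]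
        rw [show PySem.Int.floordiv (len : Int) 2 = ((len / 2 : Nat) : Int) from
          PySem.Int.floordiv_natCast len 2]
        have hsum : ((len / 2 : Nat) : Int) + ((len / 2 : Nat) : Int) = (len : Int) := by
          push_cast; omega
        obtain ⟨ha1, hi1⟩ := ih l (len / 2) memo hinv hl hhalf (by push_cast at hr ⊢; omega) hlt'
        obtain ⟨ha2, hi2⟩ := ih (l + ((len / 2 : Nat) : Int)) (len / 2)
          (pvDfsA pref encCost flatCost fuel l ((len / 2 : Nat) : Int) memo).1 hi1
          (by omega) hhalf (by omega) hlt'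
        have hspec : (pvSpec fs n encCost flatCost l len).1
            = min (if pvCnt fs n l (l + (len : Int)) == 0 then flatCost
                   else (len : Int) * pvCnt fs n l (l + (len : Int)) * encCost)
                  ((pvSpec fs n encCost flatCost l (len / 2)).1
                    + (pvSpec fs n encCost flatCost (l + ((len / 2 : Nat) : Int)) (len / 2)).1) := by
          rw [pvSpec]
          simp only [hodd, hz, if_false, dite_false]
          have hxx : (pvSpec fs n encCost flatCost l (len / 2)).2
              + (pvSpec fs n encCost flatCost (l + ((len / 2 : Nat) : Int)) (len / 2)).2
              = pvCnt fs n l (l + (len : Int)) := by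
            rw [pvSpec_snd fs n encCost flatCost (len / 2) l hhalf,
                pvSpec_snd fs n encCost flatCost (len / 2) (l + ((len / 2 : Nat) : Int)) hhalf]
            have : (l + ((len / 2 : Nat) : Int)) + ((len / 2 : Nat) : Int) = l + (len : Int) := by
              omega
            rw [this]
            exact pvCnt_split fs n l (l + ((len / 2 : Nat) : Int)) (l + (len : Int))
              (by omega) (by omega)
          rw [hxx]
        have hans : (if (if pvCnt fs n l (l + (len : Int)) == 0 then flatCost
                    else (len : Int) * pvCnt fs n l (l + (len : Int)) * encCost)
                  < ((pvDfsA pref encCost flatCost fuel l ((len / 2 : Nat) : Int) memo).2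
                    + (pvDfsA pref encCost flatCost fuel (l + ((len / 2 : Nat) : Int)) ((len / 2 : Nat) : Int)
                        (pvDfsA pref encCost flatCost fuel l ((len / 2 : Nat) : Int) memo).1).2)
                 then (if pvCnt fs n l (l + (len : Int)) == 0 then flatCost
                    else (len : Int) * pvCnt fs n l (l + (len : Int)) * encCost)
                 else ((pvDfsA pref encCost flatCost fuel l ((len / 2 : Nat) : Int) memo).2
                    + (pvDfsA pref encCost flatCost fuel (l + ((len / 2 : Nat) : Int)) ((len / 2 : Nat) : Int)
                        (pvDfsA pref encCost flatCost fuel l ((len / 2 : Nat) : Int) memo).1).2))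
            = (pvSpec fs n encCost flatCost l len).1 := by
          rw [ha1, ha2, hspec, Int.min_def]
          split_ifs <;> omega
        refine ⟨hans, ?_⟩
        intro l' len' v hget
        by_cases hk : (l', len') = (l, (len : Int))
        · rw [hk, PySem.Dict.get?_insert_self] at hget
          cases hget
          rcases Prod.mk.injEq .. ▸ hk with ⟨hk1, hk2⟩
          subst hk1; subst hk2
          refine ⟨by omega, ?_⟩
          rw [show ((len : Int)).toNat = len by omega]
          exact hans.symm ▸ (by rw [← hans])
        · rw [PySem.Dict.get?_insert_of_ne _ _ hk] at hget
          exact hi2 l' len' v hget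

-- ===== VERDICT (by name: the statement is the Claim_ definition above) =====
theorem getMinimumStorageCost_spec : Claim_equal_getMinimumStorageCost := by
  intro n encCost flatCost fs _dom
  unfold Spec_getMinimumStorageCost
  by_cases h : n ≤ 0
  · simp [getMinimumStorageCost, getMinimumStorageCost_alt, h]
  · simp only [getMinimumStorageCost, getMinimumStorageCost_alt, if_neg h]
    have hfuel : n.toNat < 2 ^ (n.toNat + 1) :=
      lt_of_lt_of_le Nat.lt_two_pow_self (Nat.pow_le_pow_right (by norm_num) (Nat.le_succ _))
    have hcast : ((n.toNat : Nat) : Int) = n := by omega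
    -- B side
    have hb := pvDfsB_eq_spec fs n encCost flatCost (n.toNat + 1) 1 n.toNat (by omega) hfuel
    rw [hcast] at hb
    rw [hb]
    -- A side
    set isSens : List Int := fs.foldl
      (fun a f => if 1 ≤ f ∧ f ≤ n then PySem.List.pySetD a f 1 else a)
      (List.replicate (n + 1).toNat 0) with hisSens
    have hmark := pvMark n fs (List.replicate (n + 1).toNat 0) (fun _ => 0)
      (by simp)
      (by
        intro j h0 hn'
        have hje : (j : Int) = ((j.toNat : Nat) : Int) := (Int.toNat_of_nonneg h0).symm
        rw [hje, PySem.List.pyGetD_natCast]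
        exact List.getD_replicate (0:Int) (y := (0:Int)) (i := j.toNat) (n := (n+1).toNat) (by omega))
    have hs : ∀ j : Int, 0 ≤ j → j ≤ n →
        PySem.List.pyGetD isSens j 0 = if pvPred fs n j then 1 else 0 := by
      intro j h0 hn'
      rw [hisSens, hmark.2 j h0 hn']
      by_cases hp : j ∈ fs ∧ 1 ≤ j
      · rw [if_pos hp, if_pos (by simp [pvPred, hp.1, hp.2, hn'])]
      · rw [if_neg hp, if_neg (by simp [pvPred]; intro hm h1; exact absurd ⟨hm, h1⟩ hp)]
    have hpref := pvPref fs n isSens hs n.toNat (by omega)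
    rw [show (1 + ((n.toNat : Nat) : Int)) = n + 1 by omega] at hpref
    have hx : ∀ (l : Int) (len : Nat), 1 ≤ l → 0 < len → l + (len : Int) - 1 ≤ n →
        PySem.List.pyGetD ((PySem.List.pyRange 1 (n + 1) 1).foldl
          (fun a i => PySem.List.pySetD a i (PySem.List.pyGetD a (i - 1) 0 + PySem.List.pyGetD isSens i 0))
          (List.replicate (n + 1).toNat (0:Int))) (l + (len : Int) - 1) 0
        - PySem.List.pyGetD ((PySem.List.pyRange 1 (n + 1) 1).foldl
          (fun a i => PySem.List.pySetD a i (PySem.List.pyGetD a (i - 1) 0 + PySem.List.pyGetD isSens i 0))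
          (List.replicate (n + 1).toNat (0:Int))) (l - 1) 0
        = pvCnt fs n l (l + (len : Int)) := by
      intro l len h1 h2 h3
      have hr1 := hpref.2 (l + (len : Int) - 1) (by omega) (by omega)
      rw [if_pos (by omega : l + (len : Int) - 1 ≤ ((n.toNat : Nat) : Int))] at hr1
      have hr2 := hpref.2 (l - 1) (by omega) (by omega)
      rw [if_pos (by omega : l - 1 ≤ ((n.toNat : Nat) : Int))] at hr2
      rw [hr1, hr2, show (l + (len : Int) - 1 + 1) = l + (len : Int) by ring,
          show (l - 1 + 1) = l by ring]
      have hsplit := pvCnt_split fs n 1 l (l + (len : Int)) (by omega) (by omega)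
      linarith
    have hinv0 : pvInv fs n encCost flatCost (PySem.Dict.empty : PySem.Dict (Int × Int) Int) := by
      intro l' len' v hget
      simp [PySem.Dict.empty, PySem.Dict.get?] at hget
    have hmain := (pvDfsA_main fs n encCost flatCost _ hx (n.toNat + 1) 1 n.toNat
      PySem.Dict.empty hinv0 (le_refl 1) (by omega) (by omega) hfuel).1
    rw [hcast] at hmain
    exact hmain
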